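-- pv_equiv track=rewrite | github.com/ituitis-dograr18/Planner | database.py | create_totalnew
-- ===== SOURCE A (Python) =====
-- def create_totalnew(total):
--     totalnew = total
--     for x in totalnew:
--         if x[1] == "zero_to_one":
--             x[1] = "00:00 - 01:00"
--
--         elif x[1] == "one_to_two":
--             x[1] = "01:00 - 02:00"
--
--         elif x[1] == "two_to_three":
--             x[1] = "02:00 - 03:00"
--
--         elif x[1] == "three_to_four":
--             x[1] = "03:00 - 04:00"
--
--         elif x[1] == "four_to_five":
--             x[1] = "04:00 - 05:00"
--
--         elif x[1] == "five_to_six":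
--             x[1] = "05:00 - 06:00"
--
--         elif x[1] == "six_to_seven":
--             x[1] = "06:00 - 07:00"
--
--         elif x[1] == "seven_to_eight":
--             x[1] = "07:00 - 08:00"
--
--         elif x[1] == "eight_to_nine":
--             x[1] = "08:00 - 09:00"
--
--         elif x[1] == "nine_to_ten":
--             x[1] = "09:00 - 10:00"
--
--         elif x[1] == "ten_to_eleven":
--             x[1] = "10:00 - 11:00"
--
--         elif x[1] == "eleven_to_twelve":
--             x[1] = "11:00 - 12:00"
--
--         elif x[1] == "twelve_to_thirteen":
--             x[1] = "12:00 - 13:00"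
--
--         elif x[1] == "thirteen_to_fourteen":
--             x[1] = "13:00 - 14:00"
--
--         elif x[1] == "fourteen_to_fifteen":
--             x[1] = "14:00 - 15:00"
--
--         elif x[1] == "fifteen_to_sixteen":
--             x[1] = "15:00 - 16:00"
--
--         elif x[1] == "sixteen_to_seventeen":
--             x[1] = "16:00 - 17:00"
--
--         elif x[1] == "seventeen_to_eighteen":
--             x[1] = "17:00 - 18:00"
--
--         elif x[1] == "eighteen_to_nineteen":
--             x[1] = "18:00 - 19:00"
--
--         elif x[1] == "nineteen_to_twenty":
--             x[1] = "19:00 - 20:00"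
--
--         elif x[1] == "twenty_to_twentyone":
--             x[1] = "20:00 - 21:00"
--
--         elif x[1] == "twentyone_to_twentytwo":
--             x[1] = "21:00 - 22:00"
--
--         elif x[1] == "twentytwo_to_twentythree":
--             x[1] = "22:00 - 23:00"
--
--         elif x[1] == "twentythree_to_twentyfour":
--             x[1] = "23:00 - 24:00"
--
--     return totalnew
-- ===== SOURCE B (Python) =====
-- NAMES = ["zero", "one", "two", "three", "four", "five", "six", "seven",
--          "eight", "nine", "ten", "eleven", "twelve", "thirteen", "fourteen",
--          "fifteen", "sixteen", "seventeen", "eighteen", "nineteen", "twenty",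
--          "twentyone", "twentytwo", "twentythree", "twentyfour"]
--
--
-- def create_totalnew(total):
--     # Parse the slot code instead of mapping it: split at "_to_", look the two
--     # number words up in NAMES, and format the two hours as "HH:00 - HH:00".
--     for x in total:
--         s = x[1]
--         k = s.find("_to_")
--         if k != -1:
--             a, b = s[:k], s[k + 4:]
--             if a in NAMES and b in NAMES:
--                 i, j = NAMES.index(a), NAMES.index(b)
--                 if j == i + 1:
--                     x[1] = str(i).zfill(2) + ":00 - " + str(j).zfill(2) + ":00"
--     return total
-- ===== Notes on version B (the rewrite author's own statement) =====
-- stated objective: alternative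
-- what changed: Instead of mapping each of the 24 slot codes through a hard-coded if/elif chain, B parses the code: it splits at '_to_', looks the two number words up in a 25-word NAMES list, checks the hours are consecutive, and formats the range with zero-padding.
import Mathlib
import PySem

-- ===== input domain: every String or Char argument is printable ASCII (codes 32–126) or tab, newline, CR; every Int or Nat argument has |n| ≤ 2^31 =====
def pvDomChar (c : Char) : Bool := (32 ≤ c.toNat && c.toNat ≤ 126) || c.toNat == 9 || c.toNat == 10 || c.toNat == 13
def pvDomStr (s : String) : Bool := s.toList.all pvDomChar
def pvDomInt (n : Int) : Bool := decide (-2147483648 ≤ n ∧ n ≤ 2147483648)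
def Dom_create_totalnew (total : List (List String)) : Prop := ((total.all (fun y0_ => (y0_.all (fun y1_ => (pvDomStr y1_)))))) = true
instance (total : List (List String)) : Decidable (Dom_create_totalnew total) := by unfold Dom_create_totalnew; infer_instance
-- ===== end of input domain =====

-- B parses the slot code (split at "_to_", look the number words up, format the hours)
-- instead of A's 24-branch if/elif mapping; Python mutates the argument in place, the
-- RETURN value is what is proved equal.

-- ===== PORT A =====
-- A's if/elif chain deciding the new value of x[1], branch for branch in A's order.
def pvChainA (s : String) : String :=
  if s == "zero_to_one" then "00:00 - 01:00"
  else if s == "one_to_two" then "01:00 - 02:00"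
  else if s == "two_to_three" then "02:00 - 03:00"
  else if s == "three_to_four" then "03:00 - 04:00"
  else if s == "four_to_five" then "04:00 - 05:00"
  else if s == "five_to_six" then "05:00 - 06:00"
  else if s == "six_to_seven" then "06:00 - 07:00"
  else if s == "seven_to_eight" then "07:00 - 08:00"
  else if s == "eight_to_nine" then "08:00 - 09:00"
  else if s == "nine_to_ten" then "09:00 - 10:00"
  else if s == "ten_to_eleven" then "10:00 - 11:00"
  else if s == "eleven_to_twelve" then "11:00 - 12:00"
  else if s == "twelve_to_thirteen" then "12:00 - 13:00"
  else if s == "thirteen_to_fourteen" then "13:00 - 14:00"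
  else if s == "fourteen_to_fifteen" then "14:00 - 15:00"
  else if s == "fifteen_to_sixteen" then "15:00 - 16:00"
  else if s == "sixteen_to_seventeen" then "16:00 - 17:00"
  else if s == "seventeen_to_eighteen" then "17:00 - 18:00"
  else if s == "eighteen_to_nineteen" then "18:00 - 19:00"
  else if s == "nineteen_to_twenty" then "19:00 - 20:00"
  else if s == "twenty_to_twentyone" then "20:00 - 21:00"
  else if s == "twentyone_to_twentytwo" then "21:00 - 22:00"
  else if s == "twentytwo_to_twentythree" then "22:00 - 23:00"
  else if s == "twentythree_to_twentyfour" then "23:00 - 24:00"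
  else s

-- 'x[1] = …' on a row with ≥ 2 elements (Pre_ guarantees this; shorter rows raise in Python)
def pvRowA (x : List String) : List String :=
  match x with
  | a :: b :: rest => a :: pvChainA b :: rest
  | _ => x

def create_totalnew (total : List (List String)) : List (List String) :=
  total.map pvRowA

-- ===== PORT B =====
-- NAMES from Source B: the hour words; a word's index is its hour.
def pvNames : List String :=
  ["zero", "one", "two", "three", "four", "five", "six", "seven",
   "eight", "nine", "ten", "eleven", "twelve", "thirteen", "fourteen",
   "fifteen", "sixteen", "seventeen", "eighteen", "nineteen", "twenty",
   "twentyone", "twentytwo", "twentythree", "twentyfour"]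

-- str(i).zfill(2)
def pvFmtHour (i : Nat) : String := PySem.Str.zfill (PySem.Int.toStr i) 2

-- B on one cell: k = s.find("_to_"); the slices s[:k] and s[k+4:] are looked up in NAMES;
-- if the hours are consecutive, format them. Python's str '+' is ported as exact
-- concatenation of the code-point lists (String.mk ... ++ ...).
def pvReplB (s : String) : String :=
  let k := PySem.Str.find s "_to_"
  if k ≠ -1 then
    match PySem.List.index? pvNames (PySem.Str.slice s none (some k)),
          PySem.List.index? pvNames (PySem.Str.slice s (some (k + 4)) none) with
    | some i, some j =>
        if j = i + 1 then
          String.ofList ((pvFmtHour i).toList ++ ":00 - ".toList ++ (pvFmtHour j).toList ++ ":00".toList)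
        else s
    | _, _ => s
  else s

-- 'x[1] = …' on each row, as in A
def pvRowB (x : List String) : List String :=
  match x with
  | a :: b :: rest => a :: pvReplB b :: rest
  | _ => x

def create_totalnew_alt (total : List (List String)) : List (List String) :=
  total.map pvRowB

-- ===== PRECONDITION & SPEC =====
-- Pre_ excludes inputs containing a row with fewer than 2 entries: there Python A (and B)
-- raises IndexError at 'x[1]'.
def Pre_create_totalnew (total : List (List String)) : Prop :=
  ∀ x ∈ total, 2 ≤ x.length
instance (total : List (List String)) : Decidable (Pre_create_totalnew total) := by
  unfold Pre_create_totalnew; infer_instance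

def pvWitness_create_totalnew : List (List String) :=
  [["a", "one_to_two", "x"], ["b", "junk"]]

def Spec_create_totalnew (total : List (List String)) (out : List (List String)) : Prop := out = create_totalnew_alt total
instance (total : List (List String)) (out : List (List String)) : Decidable (Spec_create_totalnew total out) := by unfold Spec_create_totalnew; infer_instance

-- ===== CLAIM =====
def Claim_equal_create_totalnew : Prop := ∀ (total : List (List String)), Dom_create_totalnew total → Pre_create_totalnew total → Spec_create_totalnew total (create_totalnew total)

-- ===== LEMMAS AND PROOFS =====
-- the 24 slot codes A recognises (proof-only)
def pvCodes : List String :=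
  ["zero_to_one", "one_to_two", "two_to_three", "three_to_four", "four_to_five",
   "five_to_six", "six_to_seven", "seven_to_eight", "eight_to_nine", "nine_to_ten",
   "ten_to_eleven", "eleven_to_twelve", "twelve_to_thirteen", "thirteen_to_fourteen",
   "fourteen_to_fifteen", "fifteen_to_sixteen", "sixteen_to_seventeen",
   "seventeen_to_eighteen", "eighteen_to_nineteen", "nineteen_to_twenty",
   "twenty_to_twentyone", "twentyone_to_twentytwo", "twentytwo_to_twentythree",
   "twentythree_to_twentyfour"]

theorem chainA_id_of_not_code (s : String) (hs : s ∉ pvCodes) : pvChainA s = s := by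
  simp only [pvCodes, List.mem_cons, not_or, List.not_mem_nil] at hs
  obtain ⟨h0,h1,h2,h3,h4,h5,h6,h7,h8,h9,h10,h11,h12,h13,h14,h15,h16,h17,h18,h19,h20,h21,h22,h23,-⟩ := hs
  simp [pvChainA, h0,h1,h2,h3,h4,h5,h6,h7,h8,h9,h10,h11,h12,h13,h14,h15,h16,h17,h18,h19,h20,h21,h22,h23]

set_option maxHeartbeats 2000000 in
theorem codes_of_names : ∀ i < 24, pvNames[i]!.toList ++ "_to_".toList ++ pvNames[i+1]!.toList ∈ pvCodes.map String.toList := by decide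

theorem replB_id_of_not_code (s : String) (hs : s ∉ pvCodes) : pvReplB s = s := by
  unfold pvReplB
  by_cases hk : PySem.Str.find s "_to_" = -1
  · rw [if_neg (not_not_intro hk)]
  · rw [if_pos hk]
    rcases hA : PySem.List.index? pvNames (PySem.Str.slice s none (some (PySem.Str.find s "_to_"))) with - | i <;>
      rcases hB : PySem.List.index? pvNames (PySem.Str.slice s (some (PySem.Str.find s "_to_" + 4)) none) with - | j <;>
      try rfl
    by_cases hij : j = i + 1
    · exfalso
      subst hij
      have hfe : PySem.Str.find s "_to_" = PySem.Chars.find s.toList "_to_".toList := PySem.Str.find_eq s "_to_"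
      have hk0 : 0 ≤ PySem.Chars.find s.toList "_to_".toList := by
        have := PySem.Chars.neg_one_le_find s.toList "_to_".toList
        rw [hfe] at hk; omega
      set n : Nat := (PySem.Chars.find s.toList "_to_".toList).toNat with hn
      have hff : PySem.Chars.findFrom s.toList "_to_".toList ((0:Nat):Int) = PySem.Chars.find s.toList "_to_".toList := by
        norm_num [PySem.Chars.findFrom_zero]
      have hspec := PySem.Chars.findFrom_natCast_spec s.toList "_to_".toList 0 (Nat.zero_le _) (by rw [hff, ← hfe]; exact hk)
      rw [hff] at hspec
      obtain ⟨-, hpre, -⟩ := hspec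
      obtain ⟨t, ht⟩ := hpre
      have hsplit : s.toList = s.toList.take n ++ "_to_".toList ++ t := by
        rw [List.append_assoc, ht, List.take_append_drop]
      have ha : (PySem.Str.slice s none (some (PySem.Str.find s "_to_"))).toList = s.toList.take n := by
        rw [PySem.Str.toList_slice, PySem.Chars.slice_eq_listSlice, hfe,
            PySem.List.slice_to _ hk0]
      have hb : (PySem.Str.slice s (some (PySem.Str.find s "_to_" + 4)) none).toList = t := by
        rw [PySem.Str.toList_slice, PySem.Chars.slice_eq_listSlice, hfe,
            PySem.List.slice_from _ (by omega)]
        have h4 : (PySem.Chars.find s.toList "_to_".toList + 4).toNat = n + 4 := by omega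
        have hdd : List.drop 4 (List.drop n s.toList) = List.drop (n + 4) s.toList := by
          simp [List.drop_drop, Nat.add_comm]
        rw [h4, ← hdd, ← ht]
        simp
      obtain ⟨hi, hai, -⟩ := PySem.List.getElem_of_index?_eq_some hA
      obtain ⟨hj, hbj, -⟩ := PySem.List.getElem_of_index?_eq_some hB
      have hi24 : i < 24 := by simp [pvNames] at hj; omega
      have hmem := codes_of_names i hi24
      have hga : pvNames[i]! = pvNames[i]'hi := by
        rw [List.getElem!_eq_getElem?_getD, List.getElem?_eq_getElem hi]; rfl
      have hgb : pvNames[i+1]! = pvNames[i+1]'hj := by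
        rw [List.getElem!_eq_getElem?_getD, List.getElem?_eq_getElem hj]; rfl
      have hS : s.toList ∈ pvCodes.map String.toList := by
        rw [hsplit, ← ha, ← hb, ← hai, ← hbj, ← hga, ← hgb]; exact hmem
      obtain ⟨c, hc, hcs⟩ := List.mem_map.mp hS
      exact hs (by rwa [← String.toList_inj.mp hcs])
    · exact if_neg hij


set_option maxHeartbeats 4000000 in
theorem repl_eq (s : String) : pvChainA s = pvReplB s := by
  by_cases hs : s ∈ pvCodes
  · fin_cases hs <;> decide
  · rw [chainA_id_of_not_code s hs, replB_id_of_not_code s hs]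

-- ===== VERDICT =====
theorem create_totalnew_spec : Claim_equal_create_totalnew := by
  intro total _ _
  unfold Spec_create_totalnew create_totalnew create_totalnew_alt
  refine List.map_congr_left (fun x _ => ?_)
  cases x with
  | nil => rfl
  | cons a t =>
    cases t with
    | nil => rfl
    | cons b rest => simp [pvRowA, pvRowB, repl_eq]
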